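-- pv_equiv track=rewrite | github.com/sabdi077/Max._Likelihood_-_Transient_Q_ij | AlphaBetaPlotsEvolutionPhases.py | find_expert_segments_rev
-- ===== SOURCE A (Python) =====
-- def find_expert_segments_rev(expert_series, rew_prob, countdown):
--     expert_segments = []
--     in_segment = False
--     segment_start = None
--
--     for i in range(len(expert_series)):
--         # Identify the start of a segment when countdown is 250 and conditions are met
--         if (countdown[i] == 250) and not in_segment:
--             in_segment = True
--             segment_start = i
--         # Identify the end of a segment when countdown hits 0
--         elif countdown[i] == 0 and in_segment:
--             in_segment = False
--             segment_end = i
--             expert_segments.append((segment_start, segment_end))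
--     return expert_segments
-- ===== SOURCE B (Python) =====
-- def find_expert_segments_rev(expert_series, rew_prob, countdown):
--     # Collect candidate boundaries in one pass each, then pair them with a two-pointer merge.
--     n = len(expert_series)
--     starts = [i for i in range(n) if countdown[i] == 250]
--     ends = [i for i in range(n) if countdown[i] == 0]
--     segments = []
--     si = 0
--     ei = 0
--     while si < len(starts) and ei < len(ends):
--         s = starts[si]
--         while ei < len(ends) and ends[ei] < s:
--             ei += 1
--         if ei == len(ends):
--             break
--         e = ends[ei]
--         segments.append((s, e))
--         ei += 1
--         while si < len(starts) and starts[si] < e: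
--             si += 1
--     return segments
-- ===== Notes on version B (the rewrite author's own statement) =====
-- stated objective: alternative
-- what changed: Replaces A's single-pass in_segment state machine by first extracting the start indices (countdown==250) and end indices (countdown==0) and then pairing them with a two-pointer merge that drops nested starts and any trailing open start.
import Mathlib
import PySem

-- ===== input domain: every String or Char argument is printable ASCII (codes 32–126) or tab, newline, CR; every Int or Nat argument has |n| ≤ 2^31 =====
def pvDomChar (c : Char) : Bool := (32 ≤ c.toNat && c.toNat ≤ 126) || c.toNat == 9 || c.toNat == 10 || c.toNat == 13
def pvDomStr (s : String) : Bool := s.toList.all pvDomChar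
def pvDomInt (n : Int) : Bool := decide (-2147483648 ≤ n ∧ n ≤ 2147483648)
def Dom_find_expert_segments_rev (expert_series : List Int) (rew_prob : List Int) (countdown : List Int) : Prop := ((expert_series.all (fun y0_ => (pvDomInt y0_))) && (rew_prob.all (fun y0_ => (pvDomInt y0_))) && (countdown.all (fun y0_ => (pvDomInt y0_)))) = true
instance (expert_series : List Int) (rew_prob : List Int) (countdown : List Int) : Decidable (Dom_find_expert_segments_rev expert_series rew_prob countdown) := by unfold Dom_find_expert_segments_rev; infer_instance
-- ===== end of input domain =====

-- B replaces A's in_segment state machine by extracting start/end index lists and pairing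
-- them with a two-pointer merge (objective: alternative decomposition, same O(n) cost).

-- ===== PORT A =====
-- single pass with an in_segment flag; segment_start = 0 stands for Python's None
-- (it is never read before being set, since in_segment starts False)
def find_expert_segments_rev (expert_series : List Int) (rew_prob : List Int) (countdown : List Int) : List (Int × Int) :=
  ((PySem.List.pyRange 0 (expert_series.length : Int) 1).foldl
    (fun st i =>
      -- countdown[i]; in range under Pre_, the default is never used there
      let c := PySem.List.pyGetD countdown i 251
      if c = 250 ∧ st.2.1 = false then (st.1, true, i)
      else if c = 0 ∧ st.2.1 = true then (st.1 ++ [(st.2.2, i)], false, st.2.2)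
      else st)
    ([], false, 0)).1

-- ===== PORT B =====
-- the two inner while-loops of Source B (advance ei past ends < s, advance si past starts < e)
-- are the dropWhile calls; the outer while-loop is the recursion on the start list
def mergeSE : List Int → List Int → List (Int × Int)
  | [], _ => []
  | s :: ss, es =>
    match es.dropWhile (fun e => decide (e < s)) with
    | [] => []
    | e :: es' => (s, e) :: mergeSE (ss.dropWhile (fun i => decide (i < e))) es'
termination_by ss _ => ss.length
decreasing_by
  exact Nat.lt_succ_of_le (List.length_dropWhile_le _ _)

def find_expert_segments_rev_alt (expert_series : List Int) (rew_prob : List Int) (countdown : List Int) : List (Int × Int) :=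
  let idxs := PySem.List.pyRange 0 (expert_series.length : Int) 1
  let starts := idxs.filter (fun i => PySem.List.pyGetD countdown i 251 == 250)
  let ends := idxs.filter (fun i => PySem.List.pyGetD countdown i 251 == 0)
  mergeSE starts ends

-- ===== PRECONDITION & SPEC =====
-- Python A raises IndexError on countdown[i] when countdown is shorter than expert_series
def Pre_find_expert_segments_rev (expert_series : List Int) (rew_prob : List Int) (countdown : List Int) : Prop :=
  expert_series.length ≤ countdown.length
instance (expert_series : List Int) (rew_prob : List Int) (countdown : List Int) : Decidable (Pre_find_expert_segments_rev expert_series rew_prob countdown) := by unfold Pre_find_expert_segments_rev; infer_instance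

def pvWitness_find_expert_segments_rev : List Int × List Int × List Int := ([1, 1, 1], [0, 0, 0], [250, 1, 0])

def Spec_find_expert_segments_rev (expert_series : List Int) (rew_prob : List Int) (countdown : List Int) (out : List (Int × Int)) : Prop := out = find_expert_segments_rev_alt expert_series rew_prob countdown
instance (expert_series : List Int) (rew_prob : List Int) (countdown : List Int) (out : List (Int × Int)) : Decidable (Spec_find_expert_segments_rev expert_series rew_prob countdown out) := by unfold Spec_find_expert_segments_rev; infer_instance

-- ===== CLAIM (what is proved, stated in full; the proofs are below) =====
def Claim_equal_find_expert_segments_rev : Prop := ∀ (expert_series : List Int) (rew_prob : List Int) (countdown : List Int), Dom_find_expert_segments_rev expert_series rew_prob countdown → Pre_find_expert_segments_rev expert_series rew_prob countdown → Spec_find_expert_segments_rev expert_series rew_prob countdown (find_expert_segments_rev expert_series rew_prob countdown)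

-- ===== LEMMAS AND PROOFS =====

-- A's loop body as a direct recursion (state machine on the index list)
def segMachine (c : Int → Int) : List Int → Bool → Int → List (Int × Int)
  | [], _, _ => []
  | i :: t, b, s =>
    if c i = 250 ∧ b = false then segMachine c t true i
    else if c i = 0 ∧ b = true then (s, i) :: segMachine c t false s
    else segMachine c t b s

theorem foldl_eq_segMachine (c : Int → Int) (l : List Int) (acc : List (Int × Int)) (b : Bool) (s : Int) :
    (l.foldl
      (fun st i =>
        if c i = 250 ∧ st.2.1 = false then (st.1, true, i)
        else if c i = 0 ∧ st.2.1 = true then (st.1 ++ [(st.2.2, i)], false, st.2.2)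
        else st)
      (acc, b, s)).1 = acc ++ segMachine c l b s := by
  induction l generalizing acc b s with
  | nil => simp [segMachine]
  | cons i t ih =>
    simp only [List.foldl_cons, segMachine]
    split_ifs with h1 h2 <;> simp [ih]

-- the core equivalence: on a strictly increasing index list, the state machine equals
-- the two-pointer merge of the filtered start/end index lists
theorem segMachine_eq_mergeSE (c : Int → Int) (l : List Int) (hl : l.Pairwise (· < ·)) :
    (∀ s0, segMachine c l false s0 =
        mergeSE (l.filter (fun i => c i == 250)) (l.filter (fun i => c i == 0))) ∧
    (∀ s, (∀ i ∈ l, s < i) → segMachine c l true s =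
        match l.filter (fun i => c i == 0) with
        | [] => []
        | e :: es' => (s, e) :: mergeSE ((l.filter (fun i => c i == 250)).dropWhile (fun i => decide (i < e))) es') := by
  induction l with
  | nil => constructor <;> intro s <;> simp [segMachine, mergeSE]
  | cons i t ih =>
    have ht : t.Pairwise (· < ·) := hl.of_cons
    have hi : ∀ j ∈ t, i < j := fun j hj => (List.pairwise_cons.mp hl).1 j hj
    obtain ⟨ih1, ih2⟩ := ih ht
    constructor
    · intro s0
      by_cases h250 : c i = 250
      · have : segMachine c (i :: t) false s0 = segMachine c t true i := by
          simp [segMachine, h250]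
        rw [this, ih2 i hi]
        have hf250 : (i :: t).filter (fun j => c j == 250) = i :: t.filter (fun j => c j == 250) := by
          simp [List.filter_cons, h250]
        have hf0 : (i :: t).filter (fun j => c j == 0) = t.filter (fun j => c j == 0) := by
          simp [List.filter_cons, h250]
        rw [hf250, hf0]
        rw [show mergeSE (i :: t.filter (fun j => c j == 250)) (t.filter (fun j => c j == 0)) =
            match (t.filter (fun j => c j == 0)).dropWhile (fun e => decide (e < i)) with
            | [] => []
            | e :: es' => (i, e) :: mergeSE ((t.filter (fun j => c j == 250)).dropWhile (fun j => decide (j < e))) es'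
          from by rw [mergeSE]]
        cases hcase : t.filter (fun j => c j == 0) with
        | nil => simp [hcase]
        | cons e es' =>
          have he : i < e := hi e (List.mem_of_mem_filter (hcase ▸ List.mem_cons_self))
          simp [List.dropWhile_cons, not_lt.mpr he.le]
      · by_cases h0 : c i = 0
        · have hm : segMachine c (i :: t) false s0 = segMachine c t false s0 := by
            simp [segMachine, h250, h0]
          have hf250 : (i :: t).filter (fun j => c j == 250) = t.filter (fun j => c j == 250) := by
            simp [List.filter_cons, h250]
          have hf0 : (i :: t).filter (fun j => c j == 0) = i :: t.filter (fun j => c j == 0) := by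
            simp [List.filter_cons, h0]
          rw [hm, ih1 s0, hf250, hf0]
          -- a stray end index before every remaining start is skipped by the merge
          cases hs : t.filter (fun j => c j == 250) with
          | nil => rw [mergeSE, mergeSE]
          | cons s' ss =>
            have his' : i < s' := hi s' (List.mem_of_mem_filter (hs ▸ List.mem_cons_self))
            rw [mergeSE, mergeSE, List.dropWhile_cons_of_pos (by simpa using his')]
        · have hm : segMachine c (i :: t) false s0 = segMachine c t false s0 := by
            simp [segMachine, h250, h0]
          have hf250 : (i :: t).filter (fun j => c j == 250) = t.filter (fun j => c j == 250) := by
            simp [List.filter_cons, h250]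
          have hf0 : (i :: t).filter (fun j => c j == 0) = t.filter (fun j => c j == 0) := by
            simp [List.filter_cons, h0]
          rw [hm, ih1 s0, hf250, hf0]
    · intro s hs
      have hst : ∀ j ∈ t, s < j := fun j hj => hs j (List.mem_cons_of_mem _ hj)
      by_cases h0 : c i = 0
      · have hm : segMachine c (i :: t) true s = (s, i) :: segMachine c t false s := by
          simp [segMachine, h0, show c i ≠ 250 by simp [h0]]
        have hf250 : (i :: t).filter (fun j => c j == 250) = t.filter (fun j => c j == 250) := by
          simp [List.filter_cons, show c i ≠ 250 by simp [h0]]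
        have hf0 : (i :: t).filter (fun j => c j == 0) = i :: t.filter (fun j => c j == 0) := by
          simp [List.filter_cons, h0]
        rw [hm, ih1 s, hf250, hf0]
        have hdrop : (t.filter (fun j => c j == 250)).dropWhile (fun j => decide (j < i)) =
            t.filter (fun j => c j == 250) := by
          cases hs' : t.filter (fun j => c j == 250) with
          | nil => rfl
          | cons s' ss =>
            have : i < s' := hi s' (List.mem_of_mem_filter (hs' ▸ List.mem_cons_self))
            rw [List.dropWhile_cons_of_neg (by simpa using not_lt.mpr this.le)]
        simp [hdrop]
      · by_cases h250 : c i = 250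
        · have hm : segMachine c (i :: t) true s = segMachine c t true s := by
            simp [segMachine, h250, h0]
          have hf250 : (i :: t).filter (fun j => c j == 250) = i :: t.filter (fun j => c j == 250) := by
            simp [List.filter_cons, h250]
          have hf0 : (i :: t).filter (fun j => c j == 0) = t.filter (fun j => c j == 0) := by
            simp [List.filter_cons, h250]
          rw [hm, ih2 s hst, hf250, hf0]
          cases hcase : t.filter (fun j => c j == 0) with
          | nil => rfl
          | cons e es' =>
            have hie : i < e := hi e (List.mem_of_mem_filter (hcase ▸ List.mem_cons_self))
            simp [List.dropWhile_cons, hie]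
        · have hm : segMachine c (i :: t) true s = segMachine c t true s := by
            simp [segMachine, h250, h0]
          have hf250 : (i :: t).filter (fun j => c j == 250) = t.filter (fun j => c j == 250) := by
            simp [List.filter_cons, h250]
          have hf0 : (i :: t).filter (fun j => c j == 0) = t.filter (fun j => c j == 0) := by
            simp [List.filter_cons, h0]
          rw [hm, ih2 s hst, hf250, hf0]

-- ===== VERDICT (by name: the statement is the Claim_ definition above) =====
theorem find_expert_segments_rev_spec : Claim_equal_find_expert_segments_rev := by
  intro es rp cd _ _
  unfold Spec_find_expert_segments_rev find_expert_segments_rev find_expert_segments_rev_alt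
  rw [foldl_eq_segMachine (fun i => PySem.List.pyGetD cd i 251)]
  rw [(segMachine_eq_mergeSE (fun i => PySem.List.pyGetD cd i 251)
        (PySem.List.pyRange 0 (es.length : Int) 1) (PySem.List.pairwise_lt_pyRange_one 0 _)).1 0]
  simp
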